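-- pv_equiv track=rewrite | github.com/OperationRecon/ICPC-2024-Training | A/football_team.py | dfs
-- ===== SOURCE A (Python) =====
-- def dfs(player,adj_list,visited,):
--     last_player = player
--     visited[player] = True
--     chain = 1
--     for i in adj_list[player]:
--         if not visited[i]:
--             ln,last_player = dfs(i,adj_list,visited)
--             chain += ln
--
--     return  chain, last_player
-- ===== SOURCE B (Python) =====
-- # Iterative DFS with an explicit stack of (node, neighbor-index, chain, last) frames,
-- # replacing A's recursion.  Like A, it marks nodes in `visited` in place (same marks,
-- # same order); the equivalence proved is about the return value.
-- def dfs(player, adj_list, visited):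
--     visited[player] = True
--     stack = [(player, 0, 1, player)]
--     while True:
--         node, i, chain, last = stack.pop()
--         neigh = adj_list[node]
--         while i < len(neigh) and visited[neigh[i]]:
--             i += 1
--         if i < len(neigh):
--             child = neigh[i]
--             visited[child] = True
--             stack.append((node, i + 1, chain, last))
--             stack.append((child, 0, 1, child))
--         else:
--             if not stack:
--                 return (chain, last)
--             pn, pi, pc, pl = stack.pop()
--             stack.append((pn, pi, pc + chain, last))
-- ===== Notes on version B (the rewrite author's own statement) =====
-- stated objective: alternative
-- what changed: Replaces A's recursive DFS by an iterative DFS over an explicit stack of (node, neighbor-index, chain, last) frames, folding each finished frame into its parent; Pre_ excludes exactly the inputs where a missing dict key on a visited node or examined neighbor makes A raise KeyError.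
import Mathlib
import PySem

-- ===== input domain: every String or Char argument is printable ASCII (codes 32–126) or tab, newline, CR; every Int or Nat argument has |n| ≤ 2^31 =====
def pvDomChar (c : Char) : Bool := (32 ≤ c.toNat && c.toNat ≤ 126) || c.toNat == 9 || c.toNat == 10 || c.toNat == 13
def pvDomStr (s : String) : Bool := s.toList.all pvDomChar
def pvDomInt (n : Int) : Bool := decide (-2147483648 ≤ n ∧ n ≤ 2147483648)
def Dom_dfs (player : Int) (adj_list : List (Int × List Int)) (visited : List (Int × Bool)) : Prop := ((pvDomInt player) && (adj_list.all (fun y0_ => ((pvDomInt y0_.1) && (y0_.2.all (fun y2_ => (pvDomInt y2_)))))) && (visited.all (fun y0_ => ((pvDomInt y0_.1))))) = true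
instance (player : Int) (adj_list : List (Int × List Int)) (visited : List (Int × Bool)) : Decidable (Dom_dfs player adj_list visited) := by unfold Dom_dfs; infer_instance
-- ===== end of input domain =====

-- B replaces A's recursive DFS by an iterative DFS over an explicit stack of
-- (node, neighbor-index, chain, last) frames; same marks on `visited` (both mutate it
-- in place in Python), equivalence proved about the return value.

-- number of keys currently mapped to False (termination measure for both ports)
def fcount (v : PySem.Dict Int Bool) : Nat := v.items.countP (fun p => !p.2)

theorem fcount_insert_le (v : PySem.Dict Int Bool) (k : Int) :
    fcount (v.insert k true) ≤ fcount v := by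
  unfold fcount
  rw [PySem.Dict.items_insert]
  split
  · rw [List.countP_map]
    apply List.countP_mono_left
    intro p _ hp
    simp only [Function.comp] at hp
    by_cases h : p.1 == k
    · simp [h] at hp
    · simpa [h] using hp
  · simp [List.countP_append]

theorem lookup_countP_lt (k : Int) : ∀ (l : List (Int × Bool)),
    (PySem.Dict.mk l).get? k = some false →
    l.countP (fun p => !(if p.1 == k then (k, true) else p).2)
      < l.countP (fun p => !p.2) := by
  intro l
  induction l with
  | nil => simp [PySem.Dict.get?]
  | cons hd tl ih =>
    intro hg
    rw [PySem.Dict.get?_mk_cons] at hg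
    by_cases hk : hd.1 == k
    · have hb : hd.2 = false := by simpa [hk] using hg
      have htl : tl.countP (fun p => !(if p.1 == k then (k, true) else p).2)
          ≤ tl.countP (fun p => !p.2) := by
        apply List.countP_mono_left
        intro p _ hp
        by_cases h : p.1 == k
        · simp [h] at hp
        · simpa [h] using hp
      simp only [List.countP_cons, hb, hk, if_true]
      simp only [Bool.not_true, Bool.not_false, if_true]
      simp only [Bool.false_eq_true, if_false]
      omega
    · simp only [hk] at hg
      have := ih hg
      rw [List.countP_cons, List.countP_cons]
      simp only [hk, Bool.false_eq_true, if_false]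
      omega

theorem fcount_insert_lt (v : PySem.Dict Int Bool) (k : Int)
    (h : v.get? k = some false) : fcount (v.insert k true) < fcount v := by
  have hc : v.contains k = true := by
    rw [PySem.Dict.contains_eq_isSome_get?, h]; rfl
  unfold fcount
  rw [PySem.Dict.items_insert_of_contains _ _ hc, List.countP_map]
  obtain ⟨items⟩ := v
  have := lookup_countP_lt k items h
  simpa [Function.comp] using this

-- ===== PORT A =====
-- A is recursive: visited[player] = True; chain = 1; for i in adj_list[player]:
--   if not visited[i]: ln, last_player = dfs(i, …); chain += ln.  The dict state is
-- threaded explicitly; the ≤-component of the result is termination plumbing only.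
-- Where Python raises (adj_list[node] / visited[i] on a missing key; excluded by Pre_)
-- the port treats the missing entry as [] / as visited.
mutual
def dfsRecA (player : Int) (adj : PySem.Dict Int (List Int)) (v : PySem.Dict Int Bool) :
    {out : (Int × Int) × PySem.Dict Int Bool // fcount out.2 ≤ fcount v} :=
  let v1 := v.insert player true
  let r := loopA adj (adj.getD player []) 1 player v1
  ⟨r.1, Nat.le_trans r.2 (fcount_insert_le v player)⟩
termination_by (fcount v, if v.get? player = some false then 0 else 2, 0)
decreasing_by
  by_cases hp : v.get? player = some false
  · exact Prod.Lex.left _ _ (fcount_insert_lt v player hp)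
  · rcases Nat.lt_or_eq_of_le (fcount_insert_le v player) with hlt | heq
    · exact Prod.Lex.left _ _ hlt
    · rw [heq]
      simp only [if_neg hp]
      exact Prod.Lex.right _ (Prod.Lex.left _ _ (by omega))

def loopA (adj : PySem.Dict Int (List Int)) (ns : List Int) (chain last : Int)
    (v : PySem.Dict Int Bool) :
    {out : (Int × Int) × PySem.Dict Int Bool // fcount out.2 ≤ fcount v} :=
  match ns with
  | [] => ⟨((chain, last), v), Nat.le_refl _⟩
  | i :: rest =>
    match h : v.get? i with
    | some false =>
      let c := dfsRecA i adj v
      let r := loopA adj rest (chain + c.1.1.1) c.1.1.2 c.1.2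
      ⟨r.1, Nat.le_trans r.2 c.2⟩
    | _ => loopA adj rest chain last v
termination_by (fcount v, 1, ns.length)
decreasing_by
  · simp [h]
    exact Prod.Lex.right _ (Prod.Lex.left _ _ (by omega))
  · rcases Nat.lt_or_eq_of_le c.2 with hlt | heq
    · exact Prod.Lex.left _ _ hlt
    · rw [heq]
      exact Prod.Lex.right _ (Prod.Lex.right _ (by simp))
  · exact Prod.Lex.right _ (Prod.Lex.right _ (by simp))
end

def dfs (player : Int) (adj_list : List (Int × List Int)) (visited : List (Int × Bool)) : Int × Int :=
  (dfsRecA player (PySem.Dict.mk adj_list) (PySem.Dict.mk visited)).1.1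

-- ===== PORT B =====
-- inner `while i < len(neigh) and visited[neigh[i]]: i += 1` of Source B
def advanceB (v : PySem.Dict Int Bool) (neigh : List Int) (i : Nat) : Nat :=
  if h : i < neigh.length then
    match v.get? neigh[i] with
    | some false => i
    | _ => advanceB v neigh (i + 1)
  else i
termination_by neigh.length - i

theorem advanceB_false (v : PySem.Dict Int Bool) (neigh : List Int) (i : Nat)
    (h : advanceB v neigh i < neigh.length) :
    v.get? (neigh.getD (advanceB v neigh i) 0) = some false := by
  fun_induction advanceB v neigh i with
  | case1 i hi hm =>
    rw [List.getD_eq_getElem _ _ h]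
    simpa using hm
  | case2 i hi hm ih => exact ih h
  | case3 i hi => omega

-- the `while True` loop of Source B over the explicit stack of frames
def runB (adj : PySem.Dict Int (List Int)) (stack : List (Int × Nat × Int × Int))
    (v : PySem.Dict Int Bool) : Int × Int :=
  match stack with
  | [] => (0, 0)  -- unreachable: Source B returns before the stack empties
  | (node, i, chain, last) :: rest =>
    let neigh := adj.getD node []
    let j := advanceB v neigh i
    if hj : j < neigh.length then
      let c := neigh[j]
      runB adj ((c, 0, 1, c) :: (node, j + 1, chain, last) :: rest) (v.insert c true)
    else
      match rest with
      | [] => (chain, last)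
      | (pn, pi, pc, _pl) :: rr => runB adj ((pn, pi, pc + chain, last) :: rr) v
termination_by (fcount v, stack.length)
decreasing_by
  · have hf := advanceB_false v neigh i hj
    rw [List.getD_eq_getElem _ _ hj] at hf
    exact Prod.Lex.left _ _ (fcount_insert_lt v _ hf)
  · exact Prod.Lex.right _ (by simp)

def dfs_alt (player : Int) (adj_list : List (Int × List Int)) (visited : List (Int × Bool)) : Int × Int :=
  runB (PySem.Dict.mk adj_list) [(player, 0, 1, player)]
    ((PySem.Dict.mk visited).insert player true)

-- ===== PRECONDITION & SPEC =====
-- nodes A's recursion actually visits: player plus everything reachable from it through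
-- edges into initially-unvisited nodes (least fixpoint, reached after ≤ #False-entries steps)
def pvReachable (player : Int) (adj_list : List (Int × List Int)) (visited : List (Int × Bool)) : List Int :=
  (fun R => PySem.Set.update R (R.flatMap (fun x =>
      ((PySem.Dict.mk adj_list).getD x []).filter
        (fun n => (PySem.Dict.mk visited).get? n == some false))))^[(visited.filter (fun p => !p.2)).length + 1] [player]

-- Pre_ excludes exactly the inputs on which Python A raises KeyError: every node the
-- recursion visits must be a key of adj_list, and each of its listed neighbors a key of
-- visited (or player itself, which A marks before any lookup).
def Pre_dfs (player : Int) (adj_list : List (Int × List Int)) (visited : List (Int × Bool)) : Prop :=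
  (PySem.Dict.mk adj_list).contains player = true ∧
  ∀ x ∈ pvReachable player adj_list visited,
    (PySem.Dict.mk adj_list).contains x = true ∧
    ∀ n ∈ (PySem.Dict.mk adj_list).getD x [],
      (PySem.Dict.mk visited).contains n = true ∨ n = player
instance (player : Int) (adj_list : List (Int × List Int)) (visited : List (Int × Bool)) : Decidable (Pre_dfs player adj_list visited) := by unfold Pre_dfs; infer_instance

def pvWitness_dfs : Int × (List (Int × List Int)) × (List (Int × Bool)) :=
  (0, [(0, [1, 2]), (1, [2]), (2, [])], [(0, false), (1, false), (2, false)])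

def Spec_dfs (player : Int) (adj_list : List (Int × List Int)) (visited : List (Int × Bool)) (out : Int × Int) : Prop := out = dfs_alt player adj_list visited
instance (player : Int) (adj_list : List (Int × List Int)) (visited : List (Int × Bool)) (out : Int × Int) : Decidable (Spec_dfs player adj_list visited out) := by unfold Spec_dfs; infer_instance

-- ===== CLAIM (what is proved, stated in full; the proofs are below) =====
def Claim_equal_dfs : Prop := ∀ (player : Int) (adj_list : List (Int × List Int)) (visited : List (Int × Bool)), Dom_dfs player adj_list visited → Pre_dfs player adj_list visited → Spec_dfs player adj_list visited (dfs player adj_list visited)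

-- ===== LEMMAS AND PROOFS =====

-- continuation: what Source B's loop does after the top frame finishes with result r
def contA (adj : PySem.Dict Int (List Int)) (rest : List (Int × Nat × Int × Int))
    (r : (Int × Int) × PySem.Dict Int Bool) : Int × Int :=
  match rest with
  | [] => r.1
  | (pn, pi, pc, _pl) :: rr => runB adj ((pn, pi, pc + r.1.1, r.1.2) :: rr) r.2

theorem loopA_drop_advance (adj : PySem.Dict Int (List Int)) (v : PySem.Dict Int Bool)
    (neigh : List Int) (i : Nat) (chain last : Int) :
    loopA adj (neigh.drop i) chain last v
      = loopA adj (neigh.drop (advanceB v neigh i)) chain last v := by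
  fun_induction advanceB v neigh i with
  | case1 i hi hm => rfl
  | case2 i hi hm ih =>
    rw [← ih, ← List.getElem_cons_drop hi, loopA]
    split
    · rename_i hf
      rw [hf] at hm
      exact absurd rfl hm
    · rfl
  | case3 i hi => rfl

theorem dfsRecA_val (p : Int) (adj : PySem.Dict Int (List Int)) (v : PySem.Dict Int Bool) :
    (dfsRecA p adj v).1 = (loopA adj (adj.getD p []) 1 p (v.insert p true)).1 := by
  rw [dfsRecA]

theorem runB_eq (N : Nat) :
    ∀ (adj : PySem.Dict Int (List Int)) (rest : List (Int × Nat × Int × Int))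
      (node : Int) (i : Nat) (chain last : Int) (v : PySem.Dict Int Bool),
      fcount v ≤ N →
      runB adj ((node, i, chain, last) :: rest) v
        = contA adj rest (loopA adj ((adj.getD node []).drop i) chain last v).1 := by
  induction N using Nat.strong_induction_on with
  | _ N IH =>
    intro adj rest node i chain last v hN
    rw [loopA_drop_advance]
    by_cases hj : advanceB v (adj.getD node []) i < (adj.getD node []).length
    · -- a further unvisited neighbor c exists: Source B pushes a frame for it
      have hf := advanceB_false v (adj.getD node []) i hj
      rw [List.getD_eq_getElem _ _ hj] at hf
      have hlt : fcount (v.insert ((adj.getD node [])[advanceB v (adj.getD node []) i]'hj) true) < fcount v :=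
        fcount_insert_lt v _ hf
      rw [runB.eq_def]
      simp only [dif_pos hj]
      rw [IH (fcount (v.insert ((adj.getD node [])[advanceB v (adj.getD node []) i]'hj) true))
            (Nat.lt_of_lt_of_le hlt hN) _ _ _ _ _ _ _ (Nat.le_refl _)]
      rw [contA]
      have hb : fcount (loopA adj ((adj.getD ((adj.getD node [])[advanceB v (adj.getD node []) i]'hj) []).drop 0) 1
            ((adj.getD node [])[advanceB v (adj.getD node []) i]'hj)
            (v.insert ((adj.getD node [])[advanceB v (adj.getD node []) i]'hj) true)).1.2 ≤ _ :=
        (loopA adj _ 1 _ _).2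
      rw [IH _ (Nat.lt_of_le_of_lt (Nat.le_trans hb (Nat.le_refl _)) (Nat.lt_of_lt_of_le hlt hN)) _ _ _ _ _ _ _ (Nat.le_refl _)]
      rw [← List.getElem_cons_drop hj, loopA]
      split
      · simp only [List.drop_zero, dfsRecA_val]
        rw [dfsRecA_val]
      · rename_i hne
        exact absurd hf hne
    · -- all remaining neighbors visited: the frame is folded into its parent
      have hdrop : (adj.getD node []).drop (advanceB v (adj.getD node []) i) = [] :=
        List.drop_eq_nil_of_le (Nat.le_of_not_lt hj)
      rw [hdrop, loopA, runB.eq_def]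
      simp only [dif_neg hj]
      match rest with
      | [] => rfl
      | (pn, pi, pc, pl) :: rr => rfl

-- ===== VERDICT (by name: the statement is the Claim_ definition above) =====
theorem dfs_spec : Claim_equal_dfs := by
  intro player adj_list visited _ _
  unfold Spec_dfs dfs dfs_alt
  rw [runB_eq (fcount ((PySem.Dict.mk visited).insert player true)) _ [] player 0 1 player _ (Nat.le_refl _)]
  simp only [List.drop_zero]
  rw [dfsRecA]
  rfl
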